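-- pv_equiv track=rewrite | github.com/MistaRNG/Bonus_Automatentheorie | B1/b1.py | find_witness
-- ===== SOURCE A (Python) =====
-- from collections import deque
-- from typing import Any, Dict, Iterable, List, Optional, Sequence, Tuple
--
-- EPSILON_SYMBOL = "\u03b5"  # Greek small epsilon
--
-- def _normalize_symbol(sym: Any) -> Optional[str]:
--     if sym is None:
--         return None
--     if isinstance(sym, str):
--         s = sym.strip()
--         if s == "" or s.lower() in {"eps", "epsilon"} or s == EPSILON_SYMBOL:
--             return None
--         return s
--     return str(sym)
--
-- def _parse_transitions(delta: Any) -> List[Tuple[Any, Optional[str], Any]]: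
--     transitions: List[Tuple[Any, Optional[str], Any]] = []
--     if isinstance(delta, dict):
--         # Allow adjacency dict: {state: {symbol: [q1, q2]}}
--         for p, sym_map in delta.items():
--             if not isinstance(sym_map, dict):
--                 raise ValueError("Delta dict values must be dicts of symbol -> targets.")
--             for sym, targets in sym_map.items():
--                 sym_norm = _normalize_symbol(sym)
--                 if isinstance(targets, (list, tuple, set)):
--                     for q in targets:
--                         transitions.append((p, sym_norm, q))
--                 else:
--                     transitions.append((p, sym_norm, targets))
--         return transitions
--
--     if not isinstance(delta, (list, tuple)):
--         raise ValueError("Delta must be a list/tuple or adjacency dict.")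
--
--     for item in delta:
--         if isinstance(item, (list, tuple)) and len(item) == 3:
--             p, a, q = item
--             transitions.append((p, _normalize_symbol(a), q))
--         elif isinstance(item, dict):
--             p = item.get("from")
--             a = item.get("symbol")
--             q = item.get("to")
--             if p is None or q is None:
--                 raise ValueError("Transition dict must have 'from' and 'to'.")
--             transitions.append((p, _normalize_symbol(a), q))
--         else:
--             raise ValueError("Each transition must be a 3-tuple/list or a dict.")
--     return transitions
--
-- def find_witness(
--     states: Iterable[Any],
--     alphabet: Iterable[Any],
--     initials: Iterable[Any],
--     finals: Iterable[Any],
--     delta: Any,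
-- ) -> Optional[str]:
--     _ = list(states)
--     _ = list(alphabet)
--     I = set(initials)
--     F = set(finals)
--     transitions = _parse_transitions(delta)
--
--     if I & F:
--         return ""
--
--     queue: deque[Any] = deque(I)
--     visited = set(I)
--     pred: Dict[Any, Tuple[Any, Optional[str]]] = {}
--
--     adj: Dict[Any, List[Tuple[Optional[str], Any]]] = {}
--     for p, a, q in transitions:
--         adj.setdefault(p, []).append((a, q))
--
--     while queue:
--         p = queue.popleft()
--         for a, q in adj.get(p, []):
--             if q in visited:
--                 continue
--             visited.add(q)
--             pred[q] = (p, a)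
--             if q in F:
--                 symbols: List[str] = []
--                 cur = q
--                 while cur in pred:
--                     prev, sym = pred[cur]
--                     if sym is not None:
--                         symbols.append(sym)
--                     cur = prev
--                 symbols.reverse()
--                 return "".join(symbols)
--             queue.append(q)
--     return None
-- ===== SOURCE B (Python) =====
-- # B: same BFS, but the witness is accumulated FORWARD on the queue entries
-- # ((state, string-so-far) pairs), dropping A's pred map and the backward
-- # reconstruction loop.  Initial states are seeded in first-occurrence order.
-- from collections import deque
--
-- EPSILON_SYMBOL = "\u03b5"
--
-- def _normalize_symbol(sym):
--     if sym is None: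
--         return None
--     if isinstance(sym, str):
--         s = sym.strip()
--         if s == "" or s.lower() in {"eps", "epsilon"} or s == EPSILON_SYMBOL:
--             return None
--         return s
--     return str(sym)
--
-- def find_witness(states, alphabet, initials, finals, delta):
--     if set(initials) & set(finals):
--         return ""
--     adj = {}
--     for p, a, q in delta:
--         adj.setdefault(p, []).append((_normalize_symbol(a), q))
--     start = list(dict.fromkeys(initials))
--     visited = set(start)
--     queue = deque((i, "") for i in start)
--     while queue:
--         p, s = queue.popleft()
--         for a, q in adj.get(p, []):
--             if q in visited:
--                 continue
--             visited.add(q)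
--             ns = s + (a if a is not None else "")
--             if q in finals:
--                 return ns
--             queue.append((q, ns))
--     return None
-- ===== Notes on version B (the rewrite author's own statement) =====
-- stated objective: simpler
-- what changed: Same BFS over the same adjacency structure, but the witness string is accumulated forward on the queue entries (state, string-so-far), which removes A's pred map and the whole backward path-reconstruction loop; initial states are seeded in deterministic first-occurrence order (the fixed reading of A's hash-ordered set(initials)).
import Mathlib
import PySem

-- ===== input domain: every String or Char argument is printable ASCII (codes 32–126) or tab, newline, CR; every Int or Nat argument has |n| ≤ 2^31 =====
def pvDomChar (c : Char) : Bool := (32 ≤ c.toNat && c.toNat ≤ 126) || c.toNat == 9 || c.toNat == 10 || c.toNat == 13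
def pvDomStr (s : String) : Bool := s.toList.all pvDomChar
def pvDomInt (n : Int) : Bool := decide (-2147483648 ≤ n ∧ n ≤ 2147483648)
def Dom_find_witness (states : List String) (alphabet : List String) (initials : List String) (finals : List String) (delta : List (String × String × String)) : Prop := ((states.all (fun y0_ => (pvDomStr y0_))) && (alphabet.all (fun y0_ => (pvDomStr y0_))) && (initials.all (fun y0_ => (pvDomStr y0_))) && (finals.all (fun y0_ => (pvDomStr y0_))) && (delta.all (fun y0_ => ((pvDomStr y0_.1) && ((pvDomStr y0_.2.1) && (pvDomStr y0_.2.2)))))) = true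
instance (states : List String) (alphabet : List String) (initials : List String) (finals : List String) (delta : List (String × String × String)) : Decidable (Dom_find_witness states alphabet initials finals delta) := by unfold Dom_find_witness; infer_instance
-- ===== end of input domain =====

-- B replaces A's pred map + backward path reconstruction by a witness string
-- accumulated forward on the queue entries (objective: simpler).  Python A seeds
-- its queue from a hash-ordered set; both ports (and B) use first-occurrence
-- order of `initials`, the deterministic reading of that order.

-- ===== PORT A =====
-- shared input parsing (identical helper `_normalize_symbol` in Source A and Source B)
def normSym (sym : String) : Option String :=
  let s := PySem.Str.strip sym
  if s = "" || PySem.Str.lower s = "eps" || PySem.Str.lower s = "epsilon" || s = "ε" then none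
  else some s

-- A's reconstruction loop `while cur in pred: …`; fuel `pred.size` suffices
-- because each step moves to an earlier-inserted key.
def chainA (pred : PySem.Dict String (String × Option String)) : Nat → String → List String
  | 0, _ => []
  | fuel+1, cur =>
    match pred.get? cur with
    | none => []
    | some (prev, sym) =>
      match sym with
      | some s => s :: chainA pred fuel prev
      | none => chainA pred fuel prev

-- the body of A's `for a, q in adj.get(p, [])` loop (early return = .inl)
def goA (F : PySem.Set String) (p : String) :
    List (Option String × String) → List String → PySem.Set String →
    PySem.Dict String (String × Option String) →
    String ⊕ (List String × PySem.Set String × PySem.Dict String (String × Option String))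
  | [], queue, visited, pred => .inr (queue, visited, pred)
  | (a, q) :: rest, queue, visited, pred =>
    if PySem.Set.contains visited q then goA F p rest queue visited pred
    else
      let visited' := PySem.Set.add visited q
      let pred' := pred.insert q (p, a)
      if PySem.Set.contains F q then
        .inl (PySem.Str.join "" ((chainA pred' (PySem.Dict.size pred') q).reverse))
      else goA F p rest (queue ++ [q]) visited' pred'

-- A's `while queue:` loop; fuel `|initials| + |delta| + 1` bounds the number of
-- pops (each state is enqueued at most once, on first visit).
def bfsA (adj : PySem.Dict String (List (Option String × String))) (F : PySem.Set String) :
    Nat → List String → PySem.Set String → PySem.Dict String (String × Option String) → Option String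
  | 0, _, _, _ => none
  | _+1, [], _, _ => none
  | fuel+1, p :: queue, visited, pred =>
    match goA F p (adj.getD p []) queue visited pred with
    | .inl r => some r
    | .inr (queue', visited', pred') => bfsA adj F fuel queue' visited' pred'

def find_witness (states : List String) (alphabet : List String) (initials : List String) (finals : List String) (delta : List (String × String × String)) : Option String :=
  let I := PySem.Set.ofList initials
  let F := PySem.Set.ofList finals
  -- `_parse_transitions`: on list-of-3-tuples input only its tuple branch runs
  let transitions := delta.map (fun t => (t.1, (normSym t.2.1, t.2.2)))
  if PySem.Set.inter I F ≠ [] then some "" else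
  let adj := transitions.foldl (fun d t => d.modify t.1 [] (fun l => l ++ [t.2])) PySem.Dict.empty
  bfsA adj F (initials.length + delta.length + 1) I I PySem.Dict.empty

-- ===== PORT B =====
-- the body of B's edge loop: `s` is the witness string accumulated so far
def goB (finals : List String) (s : String) :
    List (Option String × String) → List (String × String) → PySem.Set String →
    String ⊕ (List (String × String) × PySem.Set String)
  | [], queue, visited => .inr (queue, visited)
  | (a, q) :: rest, queue, visited =>
    if PySem.Set.contains visited q then goB finals s rest queue visited
    else
      let visited' := PySem.Set.add visited q
      let ns := s ++ (a.getD "")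
      if finals.contains q then .inl ns
      else goB finals s rest (queue ++ [(q, ns)]) visited'

-- B's `while queue:` loop, same pop bound as A's
def bfsB (adj : PySem.Dict String (List (Option String × String))) (finals : List String) :
    Nat → List (String × String) → PySem.Set String → Option String
  | 0, _, _ => none
  | _+1, [], _ => none
  | fuel+1, (p, s) :: queue, visited =>
    match goB finals s (adj.getD p []) queue visited with
    | .inl r => some r
    | .inr (queue', visited') => bfsB adj finals fuel queue' visited'

def find_witness_alt (states : List String) (alphabet : List String) (initials : List String) (finals : List String) (delta : List (String × String × String)) : Option String :=
  if PySem.Set.inter (PySem.Set.ofList initials) (PySem.Set.ofList finals) ≠ [] then some "" else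
  let adj := delta.foldl (fun d t => d.modify t.1 [] (fun l => l ++ [(normSym t.2.1, t.2.2)])) PySem.Dict.empty
  let start := PySem.List.dedup initials
  bfsB adj finals (initials.length + delta.length + 1) (start.map (fun i => (i, ""))) (PySem.Set.ofList start)

-- ===== PRECONDITION & SPEC =====
def Spec_find_witness (states : List String) (alphabet : List String) (initials : List String) (finals : List String) (delta : List (String × String × String)) (out : Option String) : Prop := out = find_witness_alt states alphabet initials finals delta
instance (states : List String) (alphabet : List String) (initials : List String) (finals : List String) (delta : List (String × String × String)) (out : Option String) : Decidable (Spec_find_witness states alphabet initials finals delta out) := by unfold Spec_find_witness; infer_instance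

-- ===== CLAIM (what is proved, stated in full; the proofs are below) =====
def Claim_equal_find_witness : Prop := ∀ (states : List String) (alphabet : List String) (initials : List String) (finals : List String) (delta : List (String × String × String)), Dom_find_witness states alphabet initials finals delta → Spec_find_witness states alphabet initials finals delta (find_witness states alphabet initials finals delta)

-- ===== LEMMAS AND PROOFS =====

-- the string A's reconstruction produces for state `q` from the pred map
def Sstr (pred : PySem.Dict String (String × Option String)) (q : String) : String :=
  PySem.Str.join "" ((chainA pred (PySem.Dict.size pred) q).reverse)

-- every key and every predecessor recorded in `pred` is visited
def Grounded (pred : PySem.Dict String (String × Option String)) (visited : PySem.Set String) : Prop :=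
  ∀ k p a, pred.get? k = some (p, a) → k ∈ visited ∧ p ∈ visited

-- the reconstruction for `q` has stabilised at fuel `pred.size`
def StableAt (pred : PySem.Dict String (String × Option String)) (q : String) : Prop :=
  ∀ f, PySem.Dict.size pred ≤ f → chainA pred f q = chainA pred (PySem.Dict.size pred) q

-- coupling invariant: B's queue is A's queue paired with the forward-accumulated strings
def RelState (qa : List String) (visited : PySem.Set String)
    (pred : PySem.Dict String (String × Option String)) (qb : List (String × String)) : Prop :=
  qb = qa.map (fun q => (q, Sstr pred q)) ∧ Grounded pred visited ∧
    (∀ x ∈ qa, x ∈ visited) ∧ (∀ x ∈ visited, StableAt pred x)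

theorem flatten_intersperse_nil {α : Type} : ∀ l : List (List α), (List.intersperse [] l).flatten = l.flatten
  | [] => rfl
  | [a] => by simp
  | a :: b :: t => by
    simp only [List.intersperse, List.flatten_cons, List.nil_append]
    rw [flatten_intersperse_nil (b :: t)]
    simp

theorem join_empty_append (u : List String) (x : String) :
    PySem.Str.join "" (u ++ [x]) = PySem.Str.join "" u ++ x := by
  simp [PySem.Str.join, PySem.Chars.join, List.intercalate, flatten_intersperse_nil]

theorem chainA_congr_insert (pred : PySem.Dict String (String × Option String))
    (visited : PySem.Set String) (qn : String) (v : String × Option String)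
    (hg : Grounded pred visited) (hqn : qn ∉ visited) :
    ∀ f q, q ∈ visited → chainA (pred.insert qn v) f q = chainA pred f q := by
  intro f
  induction f with
  | zero => intro q _; rfl
  | succ f ih =>
    intro q hq
    have hne : q ≠ qn := fun h => hqn (h ▸ hq)
    simp only [chainA, PySem.Dict.get?_insert_of_ne _ _ hne]
    cases hget : pred.get? q with
    | none => rfl
    | some pa =>
      obtain ⟨p, a⟩ := pa
      have hp := (hg q p a hget).2
      cases a <;> simp [ih p hp]

theorem grounded_get?_none (pred : PySem.Dict String (String × Option String))
    (visited : PySem.Set String) (qn : String)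
    (hg : Grounded pred visited) (hqn : qn ∉ visited) : pred.get? qn = none := by
  cases hget : pred.get? qn with
  | none => rfl
  | some pa => exact absurd (hg qn pa.1 pa.2 (by rw [hget])).1 hqn

theorem grounded_contains_false (pred : PySem.Dict String (String × Option String))
    (visited : PySem.Set String) (qn : String)
    (hg : Grounded pred visited) (hqn : qn ∉ visited) : pred.contains qn = false :=
  (PySem.Dict.get?_eq_none_iff_contains pred qn).mp (grounded_get?_none pred visited qn hg hqn)

theorem size_insert_fresh (pred : PySem.Dict String (String × Option String))
    (visited : PySem.Set String) (qn : String) (v : String × Option String)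
    (hg : Grounded pred visited) (hqn : qn ∉ visited) :
    PySem.Dict.size (pred.insert qn v) = PySem.Dict.size pred + 1 := by
  rw [PySem.Dict.size_insert]
  simp [grounded_contains_false pred visited qn hg hqn]

theorem chainA_empty (f : Nat) (q : String) : chainA PySem.Dict.empty f q = [] := by
  cases f with
  | zero => rfl
  | succ f => simp [chainA, PySem.Dict.get?_empty]

theorem stableAt_empty (q : String) : StableAt PySem.Dict.empty q := by
  intro f _; rw [chainA_empty, chainA_empty]

theorem Sstr_empty (q : String) : Sstr PySem.Dict.empty q = "" := by
  unfold Sstr; rw [chainA_empty]; rfl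

theorem chain_old (pred : PySem.Dict String (String × Option String))
    (visited : PySem.Set String) (qn : String) (v : String × Option String) (q : String)
    (hg : Grounded pred visited) (hqn : qn ∉ visited) (hq : q ∈ visited) (hs : StableAt pred q) :
    ∀ f, PySem.Dict.size pred ≤ f →
      chainA (pred.insert qn v) f q = chainA pred (PySem.Dict.size pred) q := by
  intro f hf
  rw [chainA_congr_insert pred visited qn v hg hqn f q hq, hs f hf]

theorem stableAt_old (pred : PySem.Dict String (String × Option String))
    (visited : PySem.Set String) (qn : String) (v : String × Option String) (q : String)
    (hg : Grounded pred visited) (hqn : qn ∉ visited) (hq : q ∈ visited) (hs : StableAt pred q) :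
    StableAt (pred.insert qn v) q := by
  intro f hf
  rw [size_insert_fresh pred visited qn v hg hqn] at hf
  rw [chain_old pred visited qn v q hg hqn hq hs f (by omega),
    chain_old pred visited qn v q hg hqn hq hs (PySem.Dict.size (pred.insert qn v))
      (by rw [size_insert_fresh pred visited qn v hg hqn]; omega)]

theorem Sstr_old (pred : PySem.Dict String (String × Option String))
    (visited : PySem.Set String) (qn : String) (v : String × Option String) (q : String)
    (hg : Grounded pred visited) (hqn : qn ∉ visited) (hq : q ∈ visited) (hs : StableAt pred q) :
    Sstr (pred.insert qn v) q = Sstr pred q := by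
  unfold Sstr
  rw [chain_old pred visited qn v q hg hqn hq hs (PySem.Dict.size (pred.insert qn v))
      (by rw [size_insert_fresh pred visited qn v hg hqn]; omega)]

theorem chain_new (pred : PySem.Dict String (String × Option String))
    (visited : PySem.Set String) (qn p : String) (a : Option String)
    (hg : Grounded pred visited) (hqn : qn ∉ visited) (hp : p ∈ visited) (hsp : StableAt pred p) :
    ∀ f, PySem.Dict.size pred ≤ f →
      chainA (pred.insert qn (p, a)) (f + 1) qn =
        match a with
        | some s => s :: chainA pred (PySem.Dict.size pred) p
        | none => chainA pred (PySem.Dict.size pred) p := by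
  intro f hf
  simp only [chainA, PySem.Dict.get?_insert_self]
  rw [chainA_congr_insert pred visited qn (p, a) hg hqn f p hp]
  cases a <;> simp [hsp f hf]

theorem stableAt_new (pred : PySem.Dict String (String × Option String))
    (visited : PySem.Set String) (qn p : String) (a : Option String)
    (hg : Grounded pred visited) (hqn : qn ∉ visited) (hp : p ∈ visited) (hsp : StableAt pred p) :
    StableAt (pred.insert qn (p, a)) qn := by
  intro f hf
  rw [size_insert_fresh pred visited qn (p, a) hg hqn] at hf ⊢
  obtain ⟨f', rfl⟩ : ∃ f', f = f' + 1 := ⟨f - 1, by omega⟩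
  rw [chain_new pred visited qn p a hg hqn hp hsp f' (by omega),
    chain_new pred visited qn p a hg hqn hp hsp (PySem.Dict.size pred) (le_refl _)]

theorem Sstr_new (pred : PySem.Dict String (String × Option String))
    (visited : PySem.Set String) (qn p : String) (a : Option String)
    (hg : Grounded pred visited) (hqn : qn ∉ visited) (hp : p ∈ visited) (hsp : StableAt pred p) :
    Sstr (pred.insert qn (p, a)) qn = Sstr pred p ++ a.getD "" := by
  unfold Sstr
  rw [size_insert_fresh pred visited qn (p, a) hg hqn,
    chain_new pred visited qn p a hg hqn hp hsp (PySem.Dict.size pred) (le_refl _)]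
  cases a with
  | none => simp
  | some s => rw [List.reverse_cons, join_empty_append]; rfl

theorem grounded_insert (pred : PySem.Dict String (String × Option String))
    (visited : PySem.Set String) (qn p : String) (a : Option String)
    (hg : Grounded pred visited) (hp : p ∈ visited) :
    Grounded (pred.insert qn (p, a)) (PySem.Set.add visited qn) := by
  intro k p' a' h
  by_cases hk : k = qn
  · subst hk
    rw [PySem.Dict.get?_insert_self] at h
    obtain ⟨rfl, rfl⟩ : p = p' ∧ a = a' := by simpa using h
    exact ⟨by rw [PySem.Set.mem_add]; right; rfl, by rw [PySem.Set.mem_add]; left; exact hp⟩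
  · rw [PySem.Dict.get?_insert_of_ne _ _ hk] at h
    obtain ⟨h1, h2⟩ := hg k p' a' h
    exact ⟨by rw [PySem.Set.mem_add]; left; exact h1, by rw [PySem.Set.mem_add]; left; exact h2⟩

-- the inner loops agree: early return with the same string, or related residual states
theorem go_rel (F : PySem.Set String) (finals : List String)
    (hF : ∀ x, PySem.Set.contains F x = finals.contains x) (p : String) :
    ∀ (edges : List (Option String × String)) (qa : List String)
      (visited : PySem.Set String) (pred : PySem.Dict String (String × Option String))
      (qb : List (String × String)) (s : String),
      RelState qa visited pred qb → p ∈ visited → s = Sstr pred p →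
      (∃ r, goA F p edges qa visited pred = .inl r ∧ goB finals s edges qb visited = .inl r) ∨
      (∃ qa' v' pred' qb', goA F p edges qa visited pred = .inr (qa', v', pred') ∧
        goB finals s edges qb visited = .inr (qb', v') ∧ RelState qa' v' pred' qb' ∧
        p ∈ v' ∧ s = Sstr pred' p) := by
  intro edges
  induction edges with
  | nil =>
    intro qa visited pred qb s hrel hp hs
    exact .inr ⟨qa, visited, pred, qb, rfl, rfl, hrel, hp, hs⟩
  | cons e rest ih =>
    obtain ⟨a, q⟩ := e
    intro qa visited pred qb s hrel hp hs
    obtain ⟨hqb, hg, hsub, hstab⟩ := hrel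
    by_cases hv : PySem.Set.contains visited q = true
    · simp only [goA, goB, hv, if_true]
      exact ih qa visited pred qb s ⟨hqb, hg, hsub, hstab⟩ hp hs
    · have hqn : q ∉ visited := by
        intro hmem
        exact hv (by simp [PySem.Set.contains]; exact hmem)
      simp only [goA, goB, hv, if_false, Bool.false_eq_true]
      have hsp : StableAt pred p := hstab p hp
      by_cases hf : PySem.Set.contains F q = true
      · rw [hF q] at hf
        simp only [hf, if_true, hF q]
        have hnew := Sstr_new pred visited q p a hg hqn hp hsp
        exact .inl ⟨_, rfl, by rw [hs, ← hnew]; rfl⟩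
      · rw [hF q] at hf
        simp only [hf, if_false, Bool.false_eq_true, hF q]
        apply ih
        · refine ⟨?_, grounded_insert pred visited q p a hg hp, ?_, ?_⟩
          · rw [List.map_append, hqb]
            congr 1
            · apply List.map_congr_left
              intro x hx
              have hxv : x ∈ visited := hsub x hx
              rw [Sstr_old pred visited q (p, a) x hg hqn hxv (hstab x hxv)]
            · simp only [List.map_cons, List.map_nil]
              rw [Sstr_new pred visited q p a hg hqn hp hsp, hs]
          · intro x hx
            rw [PySem.Set.mem_add]
            rcases List.mem_append.mp hx with h | h
            · exact .inl (hsub x h)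
            · right; simpa using h
          · intro x hx
            rw [PySem.Set.mem_add] at hx
            rcases hx with h | rfl
            · exact stableAt_old pred visited q (p, a) x hg hqn h (hstab x h)
            · exact stableAt_new pred visited x p a hg hqn hp hsp
        · rw [PySem.Set.mem_add]; left; exact hp
        · rw [Sstr_old pred visited q (p, a) p hg hqn hp hsp, hs]

-- the outer loops agree under the coupling invariant
theorem bfs_rel (adj : PySem.Dict String (List (Option String × String)))
    (F : PySem.Set String) (finals : List String)
    (hF : ∀ x, PySem.Set.contains F x = finals.contains x) :
    ∀ (fuel : Nat) (qa : List String) (visited : PySem.Set String)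
      (pred : PySem.Dict String (String × Option String)) (qb : List (String × String)),
      RelState qa visited pred qb →
      bfsA adj F fuel qa visited pred = bfsB adj finals fuel qb visited := by
  intro fuel
  induction fuel with
  | zero => intros; rfl
  | succ fuel ih =>
    intro qa visited pred qb hrel
    obtain ⟨hqb, hg, hsub, hstab⟩ := hrel
    cases qa with
    | nil => subst hqb; rfl
    | cons p qa' =>
      subst hqb
      simp only [List.map_cons, bfsA, bfsB]
      have hrel' : RelState qa' visited pred (qa'.map fun q => (q, Sstr pred q)) :=
        ⟨rfl, hg, fun x hx => hsub x (List.mem_cons_of_mem _ hx), hstab⟩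
      have hp : p ∈ visited := hsub p List.mem_cons_self
      rcases go_rel F finals hF p (adj.getD p []) qa' visited pred
          (qa'.map fun q => (q, Sstr pred q)) (Sstr pred p) hrel' hp rfl with
        ⟨r, hA, hB⟩ | ⟨qa'', v', pred', qb'', hA, hB, hrel'', _, _⟩
      · rw [hA, hB]
      · rw [hA, hB]
        exact ih qa'' v' pred' qb'' hrel''

theorem contains_ofList_eq (finals : List String) (x : String) :
    PySem.Set.contains (PySem.Set.ofList finals) x = finals.contains x := by
  by_cases h : x ∈ finals <;>
    simp [PySem.Set.contains, PySem.Set.mem_ofList, h]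

-- ===== VERDICT (by name: the statement is the Claim_ definition above) =====
theorem find_witness_spec : Claim_equal_find_witness := by
  intro states alphabet initials finals delta _
  show find_witness states alphabet initials finals delta
      = find_witness_alt states alphabet initials finals delta
  unfold find_witness find_witness_alt
  simp only [PySem.List.dedup_eq_ofList, PySem.Set.ofList_ofList]
  split_ifs with h
  · rfl
  · rw [List.foldl_map]
    apply bfs_rel _ _ finals (contains_ofList_eq finals)
    refine ⟨?_, ?_, fun x hx => hx, fun x _ => stableAt_empty x⟩
    · simp [Sstr_empty]
    · intro k p a hk
      simp [PySem.Dict.get?_empty] at hk
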